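-- pv_equiv track=rewrite | github.com/shivbhatia10/advent_of_code_2025 | day10/day10.py | apply_button
-- ===== SOURCE A (Python) =====
-- def apply_button(curr: int, button: int, n: int) -> int | None:
--     res = 0
--     for i in range(n):
--         chunk: int = (curr >> (9 * i)) & (2**9 - 1)
--         chunk -= (button >> i) & 1
--         if chunk < 0:
--             return None
--         res |= chunk << (9 * i)
--     return res
-- ===== SOURCE B (Python) =====
-- def apply_button(curr: int, button: int, n: int) -> int | None:
--     spread = 0
--     for i in range(n):
--         if (button >> i) & 1:
--             if (curr >> (9 * i)) & 511 == 0: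
--                 return None
--             spread |= 1 << (9 * i)
--     return (curr & ((1 << (9 * max(n, 0))) - 1)) - spread
-- ===== Notes on version B (the rewrite author's own statement) =====
-- stated objective: alternative
-- what changed: Instead of reassembling the result chunk by chunk with masks and ORs, B only collects a one-bit-per-decremented-chunk 'spread' mask (failing when a chunk to decrement is zero) and returns the low-9n-bit-masked input minus that mask in a single subtraction, exploiting that decrementing a nonzero 9-bit chunk never borrows.
import Mathlib
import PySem

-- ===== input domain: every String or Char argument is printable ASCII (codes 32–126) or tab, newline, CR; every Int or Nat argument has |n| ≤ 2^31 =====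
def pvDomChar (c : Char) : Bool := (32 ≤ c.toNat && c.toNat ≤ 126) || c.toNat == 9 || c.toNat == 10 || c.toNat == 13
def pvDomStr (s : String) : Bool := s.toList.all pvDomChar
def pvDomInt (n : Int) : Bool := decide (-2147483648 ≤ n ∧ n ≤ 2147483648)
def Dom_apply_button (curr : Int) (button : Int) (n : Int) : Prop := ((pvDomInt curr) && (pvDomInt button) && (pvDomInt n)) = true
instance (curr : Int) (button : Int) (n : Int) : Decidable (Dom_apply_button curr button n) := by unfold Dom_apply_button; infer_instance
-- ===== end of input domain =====

-- B replaces the per-chunk mask/subtract/OR reassembly with a single subtraction of a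
-- one-bit-per-chunk "spread" mask from the low-9n-bit-masked input (alternative decomposition).


-- ===== PORT A =====
-- A's loop 'for i in range(n)' as an index recursion (range is lazy in Python; the early
-- 'return None' stops it): extract 9-bit chunk, subtract button bit, fail on borrow, OR back.
def pvLoopA (curr : Int) (button : Int) (n : Int) (i : Int) (res : Int) : Option Int :=
  if h : i < n then
    let chunk : Int := PySem.Int.band (curr >>> (9 * i).toNat) (2 ^ 9 - 1)
    let chunk := chunk - PySem.Int.band (button >>> i.toNat) 1
    if chunk < 0 then none
    else pvLoopA curr button n (i + 1) (PySem.Int.bor res (chunk <<< (9 * i).toNat))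
  else some res
termination_by (n - i).toNat
decreasing_by omega

def apply_button (curr : Int) (button : Int) (n : Int) : Option Int :=
  pvLoopA curr button n 0 0

-- ===== PORT B =====
-- B's loop (same lazy index recursion over range(n)): collect a one-bit-per-decremented-chunk
-- mask, failing if the chunk to decrement is zero.
def pvLoopB (curr : Int) (button : Int) (n : Int) (i : Int) (spread : Int) : Option Int :=
  if h : i < n then
    if PySem.Int.band (button >>> i.toNat) 1 ≠ 0 then
      if PySem.Int.band (curr >>> (9 * i).toNat) 511 = 0 then none
      else pvLoopB curr button n (i + 1) (PySem.Int.bor spread ((1 : Int) <<< (9 * i).toNat))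
    else pvLoopB curr button n (i + 1) spread
  else some spread
termination_by (n - i).toNat
decreasing_by all_goals omega

def apply_button_alt (curr : Int) (button : Int) (n : Int) : Option Int :=
  match pvLoopB curr button n 0 0 with
  | none => none
  | some spread =>
      some (PySem.Int.band curr (((1 : Int) <<< (9 * max n 0).toNat) - 1) - spread)

-- ===== PRECONDITION & SPEC =====
def Spec_apply_button (curr : Int) (button : Int) (n : Int) (out : Option Int) : Prop := out = apply_button_alt curr button n
instance (curr : Int) (button : Int) (n : Int) (out : Option Int) : Decidable (Spec_apply_button curr button n out) := by unfold Spec_apply_button; infer_instance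

-- ===== CLAIM (what is proved, stated in full; the proofs are below) =====
def Claim_equal_apply_button : Prop := ∀ (curr : Int) (button : Int) (n : Int), Dom_apply_button curr button n → Spec_apply_button curr button n (apply_button curr button n)

-- ===== LEMMAS AND PROOFS =====

-- List-shaped twins of the two loops (proof helpers only): same step, over an explicit index list.
def pvListA (curr : Int) (button : Int) : List Int → Int → Option Int
  | [], res => some res
  | i :: rest, res =>
    let chunk : Int := PySem.Int.band (curr >>> (9 * i).toNat) (2 ^ 9 - 1)
    let chunk := chunk - PySem.Int.band (button >>> i.toNat) 1
    if chunk < 0 then none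
    else pvListA curr button rest (PySem.Int.bor res (chunk <<< (9 * i).toNat))

def pvListB (curr : Int) (button : Int) : List Int → Int → Option Int
  | [], spread => some spread
  | i :: rest, spread =>
    if PySem.Int.band (button >>> i.toNat) 1 ≠ 0 then
      if PySem.Int.band (curr >>> (9 * i).toNat) 511 = 0 then none
      else pvListB curr button rest (PySem.Int.bor spread ((1 : Int) <<< (9 * i).toNat))
    else pvListB curr button rest spread

-- The index recursions walk exactly the index list range(i, n).
theorem pv_loopA_eq_list (curr button n : Int) (i res : Int) :
    pvLoopA curr button n i res = pvListA curr button (PySem.List.pyRange i n 1) res := by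
  generalize hf : (n - i).toNat = f
  induction f generalizing i res with
  | zero =>
    have hni : ¬ i < n := by omega
    rw [pvLoopA, dif_neg hni, PySem.List.pyRange_one_eq_nil (by omega), pvListA]
  | succ f ih =>
    have hi : i < n := by omega
    rw [pvLoopA, dif_pos hi, PySem.List.pyRange_one_cons hi]
    simp only [pvListA]
    split_ifs with h
    · rfl
    · exact ih (i + 1) _ (by omega)

theorem pv_loopB_eq_list (curr button n : Int) (i spread : Int) :
    pvLoopB curr button n i spread = pvListB curr button (PySem.List.pyRange i n 1) spread := by
  generalize hf : (n - i).toNat = f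
  induction f generalizing i spread with
  | zero =>
    have hni : ¬ i < n := by omega
    rw [pvLoopB, dif_neg hni, PySem.List.pyRange_one_eq_nil (by omega), pvListB]
  | succ f ih =>
    have hi : i < n := by omega
    rw [pvLoopB, dif_pos hi, PySem.List.pyRange_one_cons hi]
    simp only [pvListB]
    split_ifs with h1 h2
    · rfl
    · exact ih (i + 1) _ (by omega)
    · exact ih (i + 1) _ (by omega)

-- band with an all-ones mask is mod by the power of two (Python semantics, any sign).
theorem pv_band_two_pow_sub_one (x : Int) (m : Nat) :
    PySem.Int.band x ((2 : Int) ^ m - 1) = x % (2 : Int) ^ m := by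
  have hM : (0 : Int) < 2 ^ m := by positivity
  have hcast : ((2 ^ m : Nat) : Int) = (2 : Int) ^ m := by push_cast; ring
  have htN : ((2 : Int) ^ m - 1).toNat = 2 ^ m - 1 := by omega
  by_cases hx : 0 ≤ x
  · rw [PySem.Int.band, if_pos hx, if_pos (by omega)]
    rw [htN, Nat.and_two_pow_sub_one_eq_mod]
    have : x % (2:Int)^m = ((x.toNat % 2 ^ m : Nat) : Int) := by
      push_cast
      rw [Int.toNat_of_nonneg hx]
    omega
  · rw [PySem.Int.band, if_neg hx, if_pos (by omega)]
    rw [htN, Nat.and_comm, Nat.and_two_pow_sub_one_eq_mod]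
    set t : Nat := (-x - 1).toNat with ht
    have hxt : x = -(t : Int) - 1 := by omega
    have hdm := Nat.div_add_mod t (2 ^ m)
    have hlt : t % 2 ^ m < 2 ^ m := Nat.mod_lt _ (by positivity)
    have key : x % (2:Int)^m = (2:Int)^m - 1 - ((t % 2 ^ m : Nat) : Int) := by
      have : x = (-(t / 2 ^ m : Nat) - 1) * (2:Int) ^ m + ((2:Int)^m - 1 - ((t % 2 ^ m : Nat) : Int)) := by
        push_cast
        push_cast at hcast
        nlinarith [hdm, hxt]
      rw [this, add_comm, Int.add_mul_emod_self_right]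
      exact Int.emod_eq_of_lt (by push_cast; omega) (by push_cast; omega)
    omega

-- OR of a value below 2^m with a left-shift by m is plain addition (no overlapping bits).
theorem pv_bor_add (a b : Int) (m : Nat) (ha : 0 ≤ a) (hab : a < 2 ^ m) (hb : 0 ≤ b) :
    PySem.Int.bor a (b <<< m) = a + b <<< m := by
  have hbl : b <<< m = b * 2 ^ m := Int.shiftLeft_eq b m
  have h2m : (0:Int) < 2 ^ m := by positivity
  have hcast : ((2 ^ m : Nat) : Int) = (2 : Int) ^ m := by push_cast; ring
  have hbm : (0:Int) ≤ b * 2 ^ m := by positivity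
  rw [hbl, PySem.Int.bor, if_pos ha, if_pos hbm]
  have ha' : (a.toNat : Int) = a := Int.toNat_of_nonneg ha
  have hb' : (b.toNat : Int) = b := Int.toNat_of_nonneg hb
  have hc : ((b.toNat * 2 ^ m : Nat) : Int) = b * 2 ^ m := by push_cast [hb']; ring
  have hmul : (b * 2 ^ m).toNat = b.toNat * 2 ^ m := by omega
  have h2 : a.toNat < 2 ^ m := by omega
  have hor := Nat.shiftLeft_add_eq_or_of_lt h2 b.toNat
  rw [Nat.shiftLeft_eq] at hor
  rw [hmul, Nat.or_comm, ← hor]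
  push_cast [hc]
  omega

-- splitting x mod M*512 into the low part mod M and the next 9-bit digit
theorem pv_split (x M : Int) (hM : 0 < M) :
    x % (M * 512) = x % M + ((x / M) % 512) * M := by
  have hdm : M * (x / M) + x % M = x := Int.mul_ediv_add_emod x M
  have h512 : 512 * (x / M / 512) + (x / M) % 512 = x / M := Int.mul_ediv_add_emod (x / M) 512
  have hr0 : 0 ≤ x % M := Int.emod_nonneg x (by omega)
  have hr1 : x % M < M := Int.emod_lt_of_pos x hM
  have hq2 : 0 ≤ (x / M) % 512 := by omega
  have hq3 : (x / M) % 512 < 512 := by omega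
  have hx : x = (x / M / 512) * (M * 512) + (((x / M) % 512) * M + x % M) := by nlinarith [hdm, h512]
  calc x % (M * 512)
      = ((x / M / 512) * (M * 512) + (((x / M) % 512) * M + x % M)) % (M * 512) := by rw [← hx]
    _ = (((x / M) % 512) * M + x % M) % (M * 512) := by rw [add_comm, Int.add_mul_emod_self_right]
    _ = ((x / M) % 512) * M + x % M := Int.emod_eq_of_lt (by positivity) (by nlinarith)
    _ = x % M + ((x / M) % 512) * M := by ring

theorem pv_digit (x : Int) (k : Nat) :
    x % (2:Int) ^ (9 * (k+1)) = x % (2:Int) ^ (9 * k) + ((x >>> (9 * k)) % 512) * (2:Int) ^ (9 * k) := by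
  have hsr : x >>> (9 * k) = x / ((2:Int) ^ (9 * k)) := by
    rw [Int.shiftRight_eq_div_pow]; push_cast; ring_nf
  have hpow : (2:Int) ^ (9 * (k+1)) = (2:Int) ^ (9 * k) * 512 := by
    rw [show 9 * (k+1) = 9 * k + 9 by ring, pow_add]; norm_num
  rw [hpow, hsr, pv_split x _ (by positivity)]

theorem pv_listA_append (curr button : Int) (l1 l2 : List Int) (res : Int) :
    pvListA curr button (l1 ++ l2) res =
      match pvListA curr button l1 res with
      | none => none
      | some r => pvListA curr button l2 r := by
  induction l1 generalizing res with
  | nil => simp [pvListA]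
  | cons i rest ih =>
    simp only [List.cons_append, pvListA]
    split_ifs with h
    · rfl
    · exact ih _

theorem pv_listB_append (curr button : Int) (l1 l2 : List Int) (s : Int) :
    pvListB curr button (l1 ++ l2) s =
      match pvListB curr button l1 s with
      | none => none
      | some r => pvListB curr button l2 r := by
  induction l1 generalizing s with
  | nil => simp [pvListB]
  | cons i rest ih =>
    simp only [List.cons_append, pvListB]
    split_ifs with h1 h2
    · rfl
    · exact ih _
    · exact ih _

-- Main invariant: after the first k chunks, either both loops have failed, or A has
-- rebuilt r, B has collected the spread mask s, and r = (curr mod 2^(9k)) - s.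
theorem pv_main (curr button : Int) (k : Nat) :
    (pvListA curr button (PySem.List.pyRange 0 (k : Int) 1) 0 = none ∧
     pvListB curr button (PySem.List.pyRange 0 (k : Int) 1) 0 = none) ∨
    (∃ r s : Int,
      pvListA curr button (PySem.List.pyRange 0 (k : Int) 1) 0 = some r ∧
      pvListB curr button (PySem.List.pyRange 0 (k : Int) 1) 0 = some s ∧
      0 ≤ s ∧ s < 2 ^ (9 * k) ∧ 0 ≤ r ∧ r = curr % (2 : Int) ^ (9 * k) - s) := by
  induction k with
  | zero =>
    right
    refine ⟨0, 0, ?_, ?_, le_refl _, by norm_num, le_refl _, by simp⟩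
    · rw [PySem.List.pyRange_one_eq_nil (by norm_num)]; rfl
    · rw [PySem.List.pyRange_one_eq_nil (by norm_num)]; rfl
  | succ k ih =>
    have hsplit : PySem.List.pyRange 0 ((k+1 : Nat) : Int) 1 =
        PySem.List.pyRange 0 (k : Int) 1 ++ [(k : Int)] := by
      have h := PySem.List.pyRange_one_succ_right (a := 0) (b := (k : Int)) (by positivity)
      push_cast
      exact h
    rw [hsplit, pv_listA_append, pv_listB_append]
    rcases ih with ⟨hA, hB⟩ | ⟨r, s, hA, hB, hs0, hs1, hr0, hr⟩
    · left; rw [hA, hB]; exact ⟨rfl, rfl⟩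
    · rw [hA, hB]
      have ht9 : (9 * ((k : Nat) : Int)).toNat = 9 * k := by omega
      have htk : ((k : Nat) : Int).toNat = k := by omega
      have hA9 : PySem.Int.band (curr >>> (9 * k)) (2 ^ 9 - 1) = (curr >>> (9 * k)) % 512 := by
        have h := pv_band_two_pow_sub_one (curr >>> (9 * k)) 9
        norm_num at h ⊢
        exact h
      have hB9 : PySem.Int.band (curr >>> (9 * k)) 511 = (curr >>> (9 * k)) % 512 := by
        have h := pv_band_two_pow_sub_one (curr >>> (9 * k)) 9
        norm_num at h ⊢
        exact h
      have hbit : PySem.Int.band (button >>> k) 1 = (button >>> k) % 2 := by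
        rw [PySem.Int.band_one, PySem.Int.mod_eq_emod_of_pos (by norm_num : (0:Int) < 2)]
      set c0 : Int := (curr >>> (9 * k)) % 512 with hc0def
      have hc00 : 0 ≤ c0 := Int.emod_nonneg _ (by norm_num)
      have hc01 : c0 < 512 := Int.emod_lt_of_pos _ (by norm_num)
      have hcM : (0:Int) < 2 ^ (9 * k) := by positivity
      have hcurrlt : curr % (2:Int) ^ (9 * k) < 2 ^ (9 * k) := Int.emod_lt_of_pos _ hcM
      have hrlt : r < 2 ^ (9 * k) := by omega
      have hpow : (2:Int) ^ (9 * (k+1)) = (2:Int) ^ (9 * k) * 512 := by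
        rw [show 9 * (k+1) = 9 * k + 9 by ring, pow_add]; norm_num
      have hdg := pv_digit curr k
      rw [← hc0def] at hdg
      simp only [pvListA, pvListB, ht9, htk, hA9, hB9, hbit]
      have hb2 : (button >>> k) % 2 = 0 ∨ (button >>> k) % 2 = 1 := by omega
      rcases hb2 with hb | hb
      · -- button bit clear: A adds the chunk back unchanged, B keeps the spread
        rw [hb]
        rw [if_neg (by omega), if_neg (by simp)]
        right
        have hbo : PySem.Int.bor r (c0 <<< (9 * k)) = r + c0 * 2 ^ (9 * k) :=
          (pv_bor_add r c0 (9 * k) hr0 hrlt hc00).trans (by rw [Int.shiftLeft_eq])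
        refine ⟨r + c0 * 2 ^ (9 * k), s, ?_, rfl, hs0, by nlinarith, ?_, by linarith⟩
        · simp only [sub_zero, hbo]
        · nlinarith [mul_nonneg hc00 (le_of_lt hcM)]
      · -- button bit set
        rw [hb]
        by_cases hz : c0 = 0
        · -- chunk is zero: A borrows, B fails
          left
          rw [if_pos (by omega), if_pos hz]
          exact ⟨rfl, rfl⟩
        · have hcpos : 1 ≤ c0 := by omega
          have hmul1 : 0 ≤ (c0 - 1) * 2 ^ (9 * k) := mul_nonneg (by omega) (le_of_lt hcM)
          rw [if_neg (by omega), if_pos (by norm_num : (1:Int) ≠ 0), if_neg hz]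
          right
          have hboB : PySem.Int.bor s ((1:Int) <<< (9 * k)) = s + 2 ^ (9 * k) :=
            (pv_bor_add s 1 (9 * k) hs0 hs1 (by norm_num)).trans (by rw [Int.shiftLeft_eq, one_mul])
          have hboA : PySem.Int.bor r ((c0 - 1) <<< (9 * k)) = r + (c0 - 1) * 2 ^ (9 * k) :=
            (pv_bor_add r (c0 - 1) (9 * k) hr0 hrlt (by omega)).trans (by rw [Int.shiftLeft_eq])
          refine ⟨r + (c0 - 1) * 2 ^ (9 * k), s + 2 ^ (9 * k), ?_, ?_, by omega, by nlinarith,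
            by linarith, by nlinarith⟩
          · simp only [hboA]
          · simp only [hboB]

-- ===== VERDICT (by name: the statement is the Claim_ definition above) =====
theorem apply_button_spec : Claim_equal_apply_button := by
  intro curr button n _
  unfold Spec_apply_button apply_button apply_button_alt
  rw [pv_loopA_eq_list, pv_loopB_eq_list]
  by_cases hn : n ≤ 0
  · rw [PySem.List.pyRange_one_eq_nil (by omega)]
    have hmax : max n 0 = 0 := by omega
    simp [pvListA, pvListB, hmax, PySem.Int.band_zero]
  · have hk : ((n.toNat : Nat) : Int) = n := by omega
    have hmax : max n 0 = n := by omega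
    have he : (9 * max n 0).toNat = 9 * n.toNat := by rw [hmax]; omega
    have hmask : ((1:Int) <<< (9 * max n 0).toNat) - 1 = (2:Int) ^ (9 * n.toNat) - 1 := by
      rw [he, Int.shiftLeft_eq, one_mul]
    rw [hmask, show PySem.List.pyRange 0 n 1 = PySem.List.pyRange 0 ((n.toNat : Nat) : Int) 1 from by rw [hk]]
    rcases pv_main curr button n.toNat with ⟨hA, hB⟩ | ⟨r, s, hA, hB, _, _, _, hr⟩
    · rw [hA, hB]
    · rw [hA, hB, pv_band_two_pow_sub_one, hr]
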